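-- pv_equiv track=rewrite | github.com/RetteraDev/revelation-online-web | server/src/utils/database.py | pyformat2psql
-- ===== SOURCE A (Python) =====
-- import collections
-- import itertools
-- from typing import Any
--
-- def pyformat2psql(query: str, named_args: dict[str, Any]) -> tuple[str, list[Any]]:
--     positional_generator = itertools.count(1)
--     positional_map = collections.defaultdict(
--         lambda: "${}".format(next(positional_generator))
--     )
--     formatted_query = query % positional_map
--     positional_items = sorted(
--         positional_map.items(),
--         key=lambda item: int(item[1].replace("$", "")),
--     )
--     positional_args = [named_args[named_arg] for named_arg, _ in positional_items]
--     return formatted_query, positional_args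
-- ===== SOURCE B (Python) =====
-- def _tokenize(query):
--     """Split a pyformat query into (is_key, text) tokens; '%%' becomes a literal '%',
--     '%(KEY)s' (KEY may contain balanced parentheses) becomes a key token."""
--     tokens = []
--     i, n = 0, len(query)
--     while i < n:
--         c = query[i]
--         if c != "%":
--             tokens.append((False, c))
--             i += 1
--             continue
--         if i + 1 < n and query[i + 1] == "%":
--             tokens.append((False, "%"))
--             i += 2
--             continue
--         if i + 1 < n and query[i + 1] == "(":
--             depth, j = 0, i + 2
--             while j < n and not (query[j] == ")" and depth == 0):
--                 if query[j] == "(":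
--                     depth += 1
--                 elif query[j] == ")":
--                     depth -= 1
--                 j += 1
--             if j >= n:
--                 raise ValueError("incomplete format key")
--             if j + 1 >= n or query[j + 1] != "s":
--                 raise ValueError("unsupported format character")
--             tokens.append((True, query[i + 2:j]))
--             i = j + 2
--             continue
--         raise ValueError("incomplete format")
--     return tokens
--
--
-- def pyformat2psql(query, named_args):
--     tokens = _tokenize(query)
--     order = []
--     for is_key, v in tokens:
--         if is_key and v not in order:
--             order.append(v)
--     mapping = {name: "$" + str(i) for i, name in enumerate(order, 1)}
--     formatted_query = "".join(mapping[v] if is_key else v for is_key, v in tokens)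
--     return formatted_query, [named_args[name] for name in order]
-- ===== Notes on version B (the rewrite author's own statement) =====
-- stated objective: alternative
-- what changed: Replaces the side-effecting '%'-operator substitution through a defaultdict/itertools.count plus a numeric re-sort of the dict items with an explicit tokenizer: one scan splits the query into literal/key tokens, keys are numbered in first-occurrence order via enumerate, and both the formatted query and the positional argument list are read off the token list directly (no sort, no counter object).
-- outside the precondition, e.g. on pyformat2psql('%(a)r', {'a': 'x'}): A returns ("'$1'", ['x']), B raises ValueError; on pyformat2psql('%(a)5s', {'a': 'x'}): A returns ('   $1', ['x']), B raises ValueError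
import Mathlib
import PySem

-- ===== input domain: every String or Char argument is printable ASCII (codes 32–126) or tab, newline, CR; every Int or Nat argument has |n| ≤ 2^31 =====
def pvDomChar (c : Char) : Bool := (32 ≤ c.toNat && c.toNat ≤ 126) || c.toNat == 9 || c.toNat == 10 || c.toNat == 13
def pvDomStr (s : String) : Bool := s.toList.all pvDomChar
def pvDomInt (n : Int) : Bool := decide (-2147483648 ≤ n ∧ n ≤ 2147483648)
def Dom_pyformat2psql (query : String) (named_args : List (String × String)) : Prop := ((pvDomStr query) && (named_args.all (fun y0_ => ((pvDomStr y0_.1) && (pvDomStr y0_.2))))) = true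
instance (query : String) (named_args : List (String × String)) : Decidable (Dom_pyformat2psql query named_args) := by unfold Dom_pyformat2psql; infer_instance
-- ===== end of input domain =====

-- B is an explicit tokenizer (one scan into literal/key tokens, keys numbered in first-occurrence
-- order) instead of A's defaultdict-driven '%' substitution plus numeric re-sort; same return value.

-- Shared helper of both ports (and of Pre_): CPython's mapping-key scanner after '%(' — read up to
-- the parenthesis-balanced closing ')' (parens nest, as in '%((a))s'); returns (key, rest after ')').
def pvKey? : Nat → List Char → Option (List Char × List Char)
  | _, [] => none
  | depth, c :: r =>
    if c = ')' then
      match depth with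
      | 0 => some ([], r)
      | d + 1 => (pvKey? d r).map (fun p => (')' :: p.1, p.2))
    else if c = '(' then (pvKey? (depth + 1) r).map (fun p => ('(' :: p.1, p.2))
    else (pvKey? depth r).map (fun p => (c :: p.1, p.2))

theorem pvKey?_len : ∀ (d : Nat) (cs : List Char) (k r : List Char),
    pvKey? d cs = some (k, r) → r.length < cs.length := by
  intro d cs
  induction cs generalizing d with
  | nil => intro k r h; simp [pvKey?] at h
  | cons c t ih =>
    intro k r h
    simp only [pvKey?] at h
    split_ifs at h
    · cases d with
      | zero =>
        rw [Option.some.injEq, Prod.mk.injEq] at h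
        rw [← h.2]; simp
      | succ dd =>
        rcases Option.map_eq_some_iff.mp h with ⟨⟨a, b⟩, hab, hout⟩
        rw [Prod.mk.injEq] at hout; rw [← hout.2]
        exact Nat.lt_trans (ih dd a b hab) (by simp)
    · rcases Option.map_eq_some_iff.mp h with ⟨⟨a, b⟩, hab, hout⟩
      rw [Prod.mk.injEq] at hout; rw [← hout.2]
      exact Nat.lt_trans (ih (d + 1) a b hab) (by simp)
    · rcases Option.map_eq_some_iff.mp h with ⟨⟨a, b⟩, hab, hout⟩
      rw [Prod.mk.injEq] at hout; rw [← hout.2]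
      exact Nat.lt_trans (ih d a b hab) (by simp)

-- ===== PORT A =====
-- Hand port of the sort key's int(...): a base-10 digit-string value. It is exact on the strings this
-- key ever receives (the map's values "$1","$2",… with "$" removed are pure digit strings; Python's
-- int() agrees with this fold there).
def pvDigitsVal (cs : List Char) : Int := cs.foldl (fun a c => 10 * a + ((c.toNat : Int) - 48)) 0

-- 'query % positional_map' ported by hand (CPython's %-format scanner over the template, exact on the
-- inputs Pre_ admits: every '%' starts '%%' or a plain '%(key)s'); the defaultdict with the
-- itertools.count factory is the (dict, next-counter) state; on the excluded inputs Python raises.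
def scanA : List Char → PySem.Dict String String → Int → List Char × PySem.Dict String String × Int
  | [], d, n => ([], d, n)
  | c :: r, d, n =>
    if c = '%' then
      match r with
      | [] => ([], d, n)          -- ValueError 'incomplete format' (outside Pre_)
      | c2 :: r2 =>
        if c2 = '%' then
          let p := scanA r2 d n; ('%' :: p.1, p.2)
        else if c2 = '(' then
          match h : pvKey? 0 r2 with
          | some (k, rest) =>
            match rest with
            | 's' :: r3 =>
              let key := String.ofList k
              match d.get? key with
              | some v => let p := scanA r3 d n; (v.toList ++ p.1, p.2)
              | none =>
                let v := "$" ++ PySem.Int.toStr n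
                let p := scanA r3 (d.insert key v) (n + 1); (v.toList ++ p.1, p.2)
            | _ => ([], d, n)     -- conversion other than plain 's' after the key (outside Pre_)
          | none => ([], d, n)    -- ValueError 'incomplete format key' (outside Pre_)
        else ([], d, n)           -- any other conversion spec (outside Pre_)
    else
      let p := scanA r d n; (c :: p.1, p.2)
termination_by cs => cs.length
decreasing_by
  all_goals simp only [List.length_cons]
  all_goals try omega
  all_goals (have := pvKey?_len 0 r2 k ('s' :: r3) h; simp only [List.length_cons] at this; omega)

def pyformat2psql (query : String) (named_args : List (String × String)) : String × List String :=
  let s := scanA query.toList PySem.Dict.empty 1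
  let items := PySem.List.sorted s.2.1.items
    (fun it => pvDigitsVal (PySem.Str.replace it.2 "$" "").toList) false
  -- named_args[k]: Pre_ guarantees every key is present, so the default is never taken
  (String.ofList s.1, items.map (fun it => (named_args.lookup it.1).getD ""))

-- ===== PORT B =====
-- Source B's _tokenize: literal chars and '%(KEY)s' key tokens; [] stands for the raise (outside Pre_).
def tokenizeB : List Char → List (Sum Char String)
  | [] => []
  | c :: r =>
    if c = '%' then
      match r with
      | [] => []                  -- raise ValueError (outside Pre_)
      | c2 :: r2 =>
        if c2 = '%' then Sum.inl '%' :: tokenizeB r2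
        else if c2 = '(' then
          match h : pvKey? 0 r2 with
          | some (k, rest) =>
            match rest with
            | 's' :: r3 => Sum.inr (String.ofList k) :: tokenizeB r3
            | _ => []             -- raise ValueError (outside Pre_)
          | none => []            -- raise ValueError (outside Pre_)
        else []                   -- raise ValueError (outside Pre_)
    else Sum.inl c :: tokenizeB r
termination_by cs => cs.length
decreasing_by
  all_goals simp only [List.length_cons]
  all_goals try omega
  all_goals (have := pvKey?_len 0 r2 k ('s' :: r3) h; simp only [List.length_cons] at this; omega)

def pyformat2psql_alt (query : String) (named_args : List (String × String)) : String × List String :=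
  let toks := tokenizeB query.toList
  let order := toks.foldl (fun acc t => match t with
    | Sum.inr k => if acc.contains k then acc else acc ++ [k]
    | Sum.inl _ => acc) []
  let mapping := (PySem.List.enumerate order 1).map (fun p => (p.2, "$" ++ PySem.Int.toStr p.1))
  let formatted := toks.flatMap (fun t => match t with
    | Sum.inl c => [c]
    | Sum.inr k => ((mapping.lookup k).getD "").toList)
  (String.ofList formatted, order.map (fun k => (named_args.lookup k).getD ""))

-- ===== PRECONDITION & SPEC =====
-- Pre_ admits exactly the queries in the plain pyformat shape this helper is written for: every '%'
-- begins '%%' or '%(key)s' with the key present in named_args. Outside it A raises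
-- (ValueError/TypeError/KeyError) or — for conversion specs like '%(a)r', '%(a)5s' or a bare '%s' —
-- returns a width-padded/repr-quoted placeholder or the stringified defaultdict, inputs on which B's
-- stricter scanner raises ValueError instead.
-- The same shape condition as a one-character-at-a-time state machine (structural recursion, so that
-- membership in Pre_ evaluates by `decide`): lit = template text, perc = just after '%', key = inside
-- the parenthesised key (depth of nested parens, chars read so far), close = just after the ')'.
inductive pvPSt : Type
  | lit : pvPSt
  | perc : pvPSt
  | key : Nat → List Char → pvPSt
  | close : List Char → pvPSt

def pvScan (na : List (String × String)) : pvPSt → List Char → Bool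
  | .lit, [] => true
  | .lit, c :: r => if c = '%' then pvScan na .perc r else pvScan na .lit r
  | .perc, [] => false
  | .perc, c :: r =>
    if c = '%' then pvScan na .lit r
    else if c = '(' then pvScan na (.key 0 []) r
    else false
  | .key _ _, [] => false
  | .key d acc, c :: r =>
    if c = ')' then
      match d with
      | 0 => pvScan na (.close acc) r
      | dd + 1 => pvScan na (.key dd (acc ++ [c])) r
    else if c = '(' then pvScan na (.key (d + 1) (acc ++ [c])) r
    else pvScan na (.key d (acc ++ [c])) r
  | .close _, [] => false
  | .close acc, c :: r =>
    if c = 's' then (na.lookup (String.ofList acc)).isSome && pvScan na .lit r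
    else false

def Pre_pyformat2psql (query : String) (named_args : List (String × String)) : Prop :=
  pvScan named_args pvPSt.lit query.toList = true
instance (query : String) (named_args : List (String × String)) : Decidable (Pre_pyformat2psql query named_args) := by unfold Pre_pyformat2psql; infer_instance

def pvWitness_pyformat2psql : String × (List (String × String)) :=
  ("select %(a)s, %(b)s %% %(a)s", [("a", "1"), ("b", "2")])

def Spec_pyformat2psql (query : String) (named_args : List (String × String)) (out : String × List String) : Prop := out = pyformat2psql_alt query named_args
instance (query : String) (named_args : List (String × String)) (out : String × List String) : Decidable (Spec_pyformat2psql query named_args out) := by unfold Spec_pyformat2psql; infer_instance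

-- ===== CLAIM (what is proved, stated in full; the proofs are below) =====
def Claim_equal_pyformat2psql : Prop := ∀ (query : String) (named_args : List (String × String)), Dom_pyformat2psql query named_args → Pre_pyformat2psql query named_args → Spec_pyformat2psql query named_args (pyformat2psql query named_args)

-- ===== LEMMAS AND PROOFS =====

-- the positional map as a plain list: key i of the first-occurrence list l is numbered s+i
def pvMapFrom (s : Int) (l : List String) : List (String × String) :=
  (PySem.List.enumerate l s).map (fun p => (p.2, "$" ++ PySem.Int.toStr p.1))

def pvDict (seen : List String) : PySem.Dict String String := PySem.Dict.mk (pvMapFrom 1 seen)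

def pvStep (acc : List String) (t : Sum Char String) : List String :=
  match t with
  | Sum.inr k => if acc.contains k then acc else acc ++ [k]
  | Sum.inl _ => acc

def pvOrd (seen : List String) (ts : List (Sum Char String)) : List String := ts.foldl pvStep seen

def pvRender (O : List String) (t : Sum Char String) : List Char :=
  match t with
  | Sum.inl c => [c]
  | Sum.inr k => (((pvMapFrom 1 O).lookup k).getD "").toList

def pvPreChk (na : List (String × String)) : List Char → Bool
  | [] => true
  | c :: r =>
    if c = '%' then
      match r with
      | [] => false
      | c2 :: r2 =>
        if c2 = '%' then pvPreChk na r2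
        else if c2 = '(' then
          match h : pvKey? 0 r2 with
          | some (k, rest) =>
            match rest with
            | 's' :: r3 => (na.lookup (String.ofList k)).isSome && pvPreChk na r3
            | _ => false
          | none => false
        else false
    else pvPreChk na r
termination_by cs => cs.length
decreasing_by
  all_goals simp only [List.length_cons]
  all_goals try omega
  all_goals (have := pvKey?_len 0 r2 k ('s' :: r3) h; simp only [List.length_cons] at this; omega)


theorem pvScan_key_imp (na : List (String × String)) : ∀ (r : List Char) (d : Nat) (acc : List Char),
    pvScan na (.key d acc) r = true →
    ∃ kk rest, pvKey? d r = some (kk, rest) ∧ pvScan na (.close (acc ++ kk)) rest = true := by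
  intro r
  induction r with
  | nil => intro d acc h; simp [pvScan] at h
  | cons c t ih =>
    intro d acc h
    unfold pvScan at h
    by_cases h1 : c = ')'
    · subst h1
      rw [if_pos rfl] at h
      cases d with
      | zero => exact ⟨[], t, by simp [pvKey?], by simpa using h⟩
      | succ dd =>
        obtain ⟨kk, rest, hk, hc⟩ := ih dd (acc ++ [')']) h
        exact ⟨')' :: kk, rest, by simp [pvKey?, hk], by simpa [List.append_assoc] using hc⟩
    · by_cases h2 : c = '('
      · subst h2
        rw [if_neg (by decide), if_pos rfl] at h
        obtain ⟨kk, rest, hk, hc⟩ := ih (d + 1) (acc ++ ['(']) h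
        exact ⟨'(' :: kk, rest, by simp [pvKey?, hk], by simpa [List.append_assoc] using hc⟩
      · rw [if_neg h1, if_neg h2] at h
        obtain ⟨kk, rest, hk, hc⟩ := ih d (acc ++ [c]) h
        refine ⟨c :: kk, rest, ?_, by simpa [List.append_assoc] using hc⟩
        unfold pvKey?
        simp [if_neg h1, if_neg h2, hk]

theorem pvScan_close_imp (na : List (String × String)) (acc rest : List Char)
    (h : pvScan na (.close acc) rest = true) :
    ∃ r3, rest = 's' :: r3 ∧ (na.lookup (String.ofList acc)).isSome = true ∧ pvScan na .lit r3 = true := by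
  cases rest with
  | nil => simp [pvScan] at h
  | cons c3 r3 =>
    by_cases hs : c3 = 's'
    · subst hs
      unfold pvScan at h
      rw [if_pos rfl, Bool.and_eq_true] at h
      exact ⟨r3, rfl, h.1, h.2⟩
    · unfold pvScan at h
      rw [if_neg hs] at h
      cases h

theorem pvPreChk_build (na : List (String × String)) (r2 kk r3 : List Char)
    (hk : pvKey? 0 r2 = some (kk, 's' :: r3))
    (hl : (na.lookup (String.ofList kk)).isSome = true) (hp : pvPreChk na r3 = true) :
    pvPreChk na ('%' :: '(' :: r2) = true := by
  rw [pvPreChk]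
  simp only [reduceIte]
  split
  · next heq => exact absurd heq (by decide)
  · split
    next k' rest' heq =>
      rw [hk] at heq
      obtain ⟨rfl, rfl⟩ : kk = k' ∧ 's' :: r3 = rest' := by simpa using heq
      simp [hl, hp]
    next heq => rw [hk] at heq; cases heq

theorem pvScan_imp_pvPreChk : ∀ (N : Nat) (na : List (String × String)) (cs : List Char),
    cs.length ≤ N → pvScan na .lit cs = true → pvPreChk na cs = true := by
  intro N
  induction N with
  | zero =>
    intro na cs hle h
    have : cs = [] := List.eq_nil_of_length_eq_zero (by omega)
    subst this
    simp [pvPreChk]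
  | succ N ih =>
    intro na cs hle h
    cases cs with
    | nil => simp [pvPreChk]
    | cons c r =>
      by_cases hc : c = '%'
      · subst hc
        cases r with
        | nil => simp [pvScan] at h
        | cons c2 r2 =>
          by_cases h2 : c2 = '%'
          · subst h2
            simp only [pvScan, reduceIte] at h
            rw [pvPreChk]
            simp only [reduceIte]
            exact ih na r2 (by simp at hle; omega) h
          · by_cases h3 : c2 = '('
            · subst h3
              simp only [pvScan, reduceIte] at h
              obtain ⟨kk, rest, hk, hcl⟩ := pvScan_key_imp na r2 0 [] h
              obtain ⟨r3, rfl, hl, hlit⟩ := pvScan_close_imp na _ _ hcl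
              have hlen : r3.length ≤ N := by
                have := pvKey?_len 0 r2 kk ('s' :: r3) hk
                simp at hle this; omega
              exact pvPreChk_build na r2 kk r3 (by simpa using hk)
                (by simpa using hl) (ih na r3 hlen hlit)
            · unfold pvScan at h
              rw [if_pos rfl] at h
              unfold pvScan at h
              rw [if_neg h2, if_neg h3] at h
              cases h
      · unfold pvScan at h
        rw [if_neg hc] at h
        unfold pvPreChk
        rw [if_neg hc]
        exact ih na r (by simp at hle; omega) h

theorem pvLookup_none (l : List (String × String)) (K : String) :
    l.lookup K = none ↔ K ∉ l.map Prod.fst := by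
  induction l with
  | nil => simp
  | cons p t ih =>
    obtain ⟨k, v⟩ := p
    by_cases h : K = k
    · subst h; simp [List.lookup]
    · have hstep : ((k, v) :: t).lookup K = t.lookup K := by
        simp [List.lookup, beq_eq_false_iff_ne.mpr h]
      rw [hstep, ih]; simp [h]

theorem pvLookup_append_left (l1 l2 : List (String × String)) (K : String)
    (h : (l1.lookup K).isSome) : (l1 ++ l2).lookup K = l1.lookup K := by
  induction l1 with
  | nil => simp at h
  | cons p t ih =>
    obtain ⟨k, v⟩ := p
    by_cases hk : K = k
    · subst hk; simp [List.lookup]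
    · simp only [List.cons_append]
      simp only [List.lookup, beq_eq_false_iff_ne.mpr hk] at h ⊢
      exact ih h

theorem pvMapFrom_fst (s : Int) (l : List String) :
    (pvMapFrom s l).map Prod.fst = l := by
  simp [pvMapFrom, List.map_map]
  have := PySem.List.map_snd_enumerate l s
  convert this using 2

theorem pvMapFrom_append (s : Int) (xs ys : List String) :
    pvMapFrom s (xs ++ ys) = pvMapFrom s xs ++ pvMapFrom (s + xs.length) ys := by
  simp [pvMapFrom, PySem.List.enumerate_append]

theorem pvDict_get? (l : List (String × String)) (K : String) :
    (PySem.Dict.mk l).get? K = l.lookup K := by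
  induction l with
  | nil => rfl
  | cons p t ih =>
    obtain ⟨k, v⟩ := p
    rw [PySem.Dict.get?_mk_cons]
    by_cases h : K = k
    · subst h; simp [List.lookup]
    · simp [List.lookup, Ne.symm h, beq_eq_false_iff_ne.mpr h, ih]

theorem pvOrd_prefix : ∀ (ts : List (Sum Char String)) (seen : List String),
    seen <+: pvOrd seen ts := by
  intro ts
  induction ts with
  | nil => intro seen; exact List.prefix_refl seen
  | cons t r ih =>
    intro seen
    have h2 : pvStep seen t <+: pvOrd (pvStep seen t) r := ih (pvStep seen t)
    have h1 : seen <+: pvStep seen t := by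
      cases t with
      | inl c => exact List.prefix_refl seen
      | inr k =>
        simp only [pvStep]
        split_ifs
        · exact List.prefix_refl seen
        · exact List.prefix_append seen [k]
    exact h1.trans h2

theorem pvLookup_stable (seen O : List String) (K : String) (hm : K ∈ seen) (hp : seen <+: O) :
    (pvMapFrom 1 O).lookup K = (pvMapFrom 1 seen).lookup K := by
  obtain ⟨ex, rfl⟩ := hp
  rw [pvMapFrom_append]
  apply pvLookup_append_left
  rw [Option.isSome_iff_ne_none]
  intro hn
  rw [pvLookup_none, pvMapFrom_fst] at hn
  exact hn hm

theorem pvLookup_append_right (l1 l2 : List (String × String)) (K : String)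
    (h : l1.lookup K = none) : (l1 ++ l2).lookup K = l2.lookup K := by
  induction l1 with
  | nil => simp
  | cons p t ih =>
    obtain ⟨k, v⟩ := p
    by_cases hk : K = k
    · subst hk; simp [List.lookup] at h
    · simp only [List.cons_append]
      simp only [List.lookup, beq_eq_false_iff_ne.mpr hk] at h ⊢
      exact ih h

theorem pvLookup_new (seen : List String) (K : String) (hm : K ∉ seen) :
    (pvMapFrom 1 (seen ++ [K])).lookup K = some ("$" ++ PySem.Int.toStr ((seen.length : Int) + 1)) := by
  rw [pvMapFrom_append]
  rw [pvLookup_append_right _ _ _ (by rw [pvLookup_none, pvMapFrom_fst]; exact hm)]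
  simp [pvMapFrom, PySem.List.enumerate]
  rw [Int.add_comm]

theorem pvDict_insert (seen : List String) (K : String) (hm : K ∉ seen) :
    (pvDict seen).insert K ("$" ++ PySem.Int.toStr ((seen.length : Int) + 1)) = pvDict (seen ++ [K]) := by
  have hc : (pvDict seen).contains K = false := by
    rw [PySem.Dict.contains_eq_isSome_get?, pvDict, pvDict_get?]
    rw [(pvLookup_none _ _).mpr (by rw [pvMapFrom_fst]; exact hm)]
    rfl
  apply PySem.Dict.ext
  rw [PySem.Dict.items_insert_of_not_contains _ _ hc]
  show pvMapFrom 1 seen ++ _ = (pvDict (seen ++ [K])).items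
  show _ = pvMapFrom 1 (seen ++ [K])
  rw [pvMapFrom_append]
  congr 1
  simp [pvMapFrom, PySem.List.enumerate]
  rw [Int.add_comm]

theorem pvPreChk_key (na : List (String × String)) (r2 : List Char)
    (h : pvPreChk na ('%' :: '(' :: r2) = true) :
    ∃ k r3, pvKey? 0 r2 = some (k, 's' :: r3) ∧
      (na.lookup (String.ofList k)).isSome = true ∧ pvPreChk na r3 = true := by
  rw [pvPreChk] at h
  simp only [reduceIte] at h
  split at h
  · next heq => exact absurd heq (by decide)
  · split at h
    next k rest heq =>
      split at h
      next r3 hpf => exact ⟨k, r3, heq, by simpa using h⟩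
      next => exact absurd h (by simp)
    next => exact absurd h (by simp)

theorem tokenizeB_key (r2 k r3 : List Char) (h : pvKey? 0 r2 = some (k, 's' :: r3)) :
    tokenizeB ('%' :: '(' :: r2) = Sum.inr (String.ofList k) :: tokenizeB r3 := by
  rw [tokenizeB]
  simp only [reduceIte]
  split
  · next heq => exact absurd heq (by decide)
  · split
    next k' rest' heq =>
      rw [h] at heq
      obtain ⟨rfl, rfl⟩ : k = k' ∧ 's' :: r3 = rest' := by simpa using heq
      rfl
    next heq => rw [h] at heq; cases heq

theorem scanA_key_some (r2 k r3 : List Char) (d : PySem.Dict String String) (n : Int)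
    (v : String) (h : pvKey? 0 r2 = some (k, 's' :: r3))
    (hv : d.get? (String.ofList k) = some v) :
    scanA ('%' :: '(' :: r2) d n =
      (v.toList ++ (scanA r3 d n).1, (scanA r3 d n).2) := by
  rw [scanA]
  simp only [reduceIte]
  split
  · next heq => exact absurd heq (by decide)
  · split
    next k' rest' heq =>
      rw [h] at heq
      obtain ⟨rfl, rfl⟩ : k = k' ∧ 's' :: r3 = rest' := by simpa using heq
      rw [hv]
      rfl
    next heq => rw [h] at heq; cases heq

theorem scanA_key_none (r2 k r3 : List Char) (d : PySem.Dict String String) (n : Int)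
    (h : pvKey? 0 r2 = some (k, 's' :: r3))
    (hv : d.get? (String.ofList k) = none) :
    scanA ('%' :: '(' :: r2) d n =
      (("$" ++ PySem.Int.toStr n).toList
          ++ (scanA r3 (d.insert (String.ofList k) ("$" ++ PySem.Int.toStr n)) (n + 1)).1,
        (scanA r3 (d.insert (String.ofList k) ("$" ++ PySem.Int.toStr n)) (n + 1)).2) := by
  rw [scanA]
  simp only [reduceIte]
  split
  · next heq => exact absurd heq (by decide)
  · split
    next k' rest' heq =>
      rw [h] at heq
      obtain ⟨rfl, rfl⟩ : k = k' ∧ 's' :: r3 = rest' := by simpa using heq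
      rw [hv]
      rfl
    next heq => rw [h] at heq; cases heq





theorem pvMain : ∀ (N : Nat) (cs : List Char) (na : List (String × String)) (seen : List String),
    cs.length ≤ N → pvPreChk na cs = true →
    scanA cs (pvDict seen) ((seen.length : Int) + 1)
      = ((tokenizeB cs).flatMap (pvRender (pvOrd seen (tokenizeB cs))),
         pvDict (pvOrd seen (tokenizeB cs)),
         ((pvOrd seen (tokenizeB cs)).length : Int) + 1) := by
  intro N
  induction N with
  | zero =>
    intro cs na seen hle hpre
    have hnil : cs = [] := List.eq_nil_of_length_eq_zero (by omega)
    subst hnil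
    simp [scanA, tokenizeB, pvOrd]
  | succ N ih =>
    intro cs na seen hle hpre
    cases cs with
    | nil => simp [scanA, tokenizeB, pvOrd]
    | cons c r =>
      by_cases hc : c = '%'
      · subst hc
        cases r with
        | nil => simp [pvPreChk] at hpre
        | cons c2 r2 =>
          by_cases h2 : c2 = '%'
          · -- '%%': a literal percent sign
            subst h2
            rw [pvPreChk] at hpre
            simp only [reduceIte] at hpre
            unfold scanA tokenizeB
            simp only [reduceIte]
            rw [ih r2 na seen (by simp at hle; omega) hpre]
            rw [List.flatMap_cons]
            rfl
          · by_cases h3 : c2 = '('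
            · -- '%(key)s'
              subst h3
              obtain ⟨k, r3, hk, hlook, hpre3⟩ := pvPreChk_key na r2 hpre
              have hlen3 : r3.length ≤ N := by
                have := pvKey?_len 0 r2 k ('s' :: r3) hk
                simp at hle this; omega
              rw [tokenizeB_key r2 k r3 hk]
              set K := String.ofList k with hK
              by_cases hmem : K ∈ seen
              · -- key already numbered: dict and counter unchanged
                have hsome : ((pvMapFrom 1 seen).lookup K).isSome := by
                  rw [Option.isSome_iff_ne_none]
                  intro hn
                  exact ((pvLookup_none _ _).mp hn) (by rw [pvMapFrom_fst]; exact hmem)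
                obtain ⟨v, hv⟩ := Option.isSome_iff_exists.mp hsome
                have hvd : (pvDict seen).get? K = some v := by rw [pvDict, pvDict_get?]; exact hv
                rw [scanA_key_some r2 k r3 _ _ v hk hvd]
                rw [ih r3 na seen hlen3 hpre3]
                have hstep : pvStep seen (Sum.inr K) = seen := by
                  simp [pvStep, hmem]
                have hordc : pvOrd seen (Sum.inr K :: tokenizeB r3) = pvOrd seen (tokenizeB r3) := by
                  rw [pvOrd, List.foldl_cons, hstep, ← pvOrd]
                rw [hordc, List.flatMap_cons]
                have hO : (pvMapFrom 1 (pvOrd seen (tokenizeB r3))).lookup K = some v := by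
                  rw [pvLookup_stable seen _ K hmem (pvOrd_prefix _ seen), hv]
                simp only [pvRender, hO]
                rfl
              · -- fresh key: it gets the next number and is appended
                have hnone : (pvDict seen).get? K = none := by
                  rw [pvDict, pvDict_get?]
                  exact (pvLookup_none _ _).mpr (by rw [pvMapFrom_fst]; exact hmem)
                rw [scanA_key_none r2 k r3 _ _ hk hnone]
                rw [pvDict_insert seen K hmem]
                have hcast : (seen.length : Int) + 1 + 1 = (((seen ++ [K]).length : Nat) : Int) + 1 := by
                  simp
                rw [hcast]
                rw [ih r3 na (seen ++ [K]) hlen3 hpre3]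
                have hstep : pvStep seen (Sum.inr K) = seen ++ [K] := by
                  simp [pvStep, hmem]
                have hordc : pvOrd seen (Sum.inr K :: tokenizeB r3) = pvOrd (seen ++ [K]) (tokenizeB r3) := by
                  rw [pvOrd, List.foldl_cons, hstep, ← pvOrd]
                rw [hordc, List.flatMap_cons]
                have hO : (pvMapFrom 1 (pvOrd (seen ++ [K]) (tokenizeB r3))).lookup K
                    = some ("$" ++ PySem.Int.toStr ((seen.length : Int) + 1)) := by
                  rw [pvLookup_stable (seen ++ [K]) _ K (by simp) (pvOrd_prefix _ (seen ++ [K]))]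
                  exact pvLookup_new seen K hmem
                simp only [pvRender, hO]
                rfl
            · -- any other conversion spec: excluded by Pre_
              rw [pvPreChk] at hpre
              simp only [reduceIte, if_neg h2, if_neg h3] at hpre
              simp at hpre
      · -- ordinary literal character
        unfold pvPreChk at hpre
        simp only [if_neg hc] at hpre
        unfold scanA tokenizeB
        simp only [if_neg hc]
        rw [ih r na seen (by simp at hle; omega) hpre]
        rw [List.flatMap_cons]
        rfl

theorem pvTdc_step (f n : Nat) (ds : List Char) :
    Nat.toDigitsCore 10 (f + 1) n ds =
      if n / 10 = 0 then (n % 10).digitChar :: ds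
      else Nat.toDigitsCore 10 f (n / 10) ((n % 10).digitChar :: ds) := by
  rw [Nat.toDigitsCore]

theorem pvTdc_acc (f : Nat) : ∀ (n : Nat) (ds : List Char),
    Nat.toDigitsCore 10 f n ds = Nat.toDigitsCore 10 f n [] ++ ds := by
  induction f with
  | zero => intro n ds; rw [Nat.toDigitsCore]; rfl
  | succ f ih =>
    intro n ds
    rw [pvTdc_step, pvTdc_step]
    split_ifs with h
    · rfl
    · rw [ih (n / 10) ((n % 10).digitChar :: ds), ih (n / 10) [(n % 10).digitChar]]
      simp

theorem pvTdc_fuel : ∀ (n f1 f2 : Nat), n < f1 → n < f2 →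
    Nat.toDigitsCore 10 f1 n [] = Nat.toDigitsCore 10 f2 n [] := by
  intro n
  induction n using Nat.strong_induction_on with
  | _ n ih =>
    intro f1 f2 h1 h2
    obtain ⟨g1, rfl⟩ := Nat.exists_eq_succ_of_ne_zero (by omega : f1 ≠ 0)
    obtain ⟨g2, rfl⟩ := Nat.exists_eq_succ_of_ne_zero (by omega : f2 ≠ 0)
    rw [pvTdc_step, pvTdc_step]
    split_ifs with h
    · rfl
    · have hlt : n / 10 < n := Nat.div_lt_self (by omega) (by omega)
      rw [pvTdc_acc g1, pvTdc_acc g2, ih (n / 10) hlt g1 g2 (by omega) (by omega)]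

theorem pvDigits_small (n : Nat) (h : n < 10) : Nat.toDigits 10 n = [n.digitChar] := by
  rw [Nat.toDigits, pvTdc_step]
  rw [Nat.div_eq_of_lt h, Nat.mod_eq_of_lt h]
  simp

theorem pvDigits_split (n : Nat) (h : 10 ≤ n) :
    Nat.toDigits 10 n = Nat.toDigits 10 (n / 10) ++ [(n % 10).digitChar] := by
  rw [Nat.toDigits, Nat.toDigits, pvTdc_step]
  have h10 : ¬ n / 10 = 0 := by omega
  rw [if_neg h10, pvTdc_acc, pvTdc_fuel (n / 10) n (n / 10 + 1) (Nat.div_lt_self (by omega) (by omega)) (by omega)]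

theorem pvDigitChar_val (r : Nat) (h : r < 10) : ((r.digitChar.toNat : Int) - 48) = r := by
  interval_cases r <;> decide

theorem pvDigitChar_isDigit (r : Nat) (h : r < 10) : r.digitChar.isDigit = true := by
  interval_cases r <;> decide

theorem pvDigitsVal_append (A : List Char) (c : Char) :
    pvDigitsVal (A ++ [c]) = 10 * pvDigitsVal A + ((c.toNat : Int) - 48) := by
  simp [pvDigitsVal, List.foldl_append]

theorem pvDigitsVal_toDigits : ∀ (m : Nat), pvDigitsVal (Nat.toDigits 10 m) = m := by
  intro m
  induction m using Nat.strong_induction_on with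
  | _ m ih =>
    by_cases h : m < 10
    · rw [pvDigits_small m h]
      simp [pvDigitsVal]
      rw [pvDigitChar_val m h]
    · rw [pvDigits_split m (by omega), pvDigitsVal_append,
        ih (m / 10) (Nat.div_lt_self (by omega) (by omega)),
        pvDigitChar_val (m % 10) (by omega)]
      omega

theorem pvDigits_isDigit : ∀ (m : Nat) (c : Char), c ∈ Nat.toDigits 10 m → c.isDigit = true := by
  intro m
  induction m using Nat.strong_induction_on with
  | _ m ih =>
    intro c hc
    by_cases h : m < 10
    · rw [pvDigits_small m h] at hc
      simp at hc; subst hc; exact pvDigitChar_isDigit m h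
    · rw [pvDigits_split m (by omega)] at hc
      rcases List.mem_append.mp hc with h1 | h1
      · exact ih (m / 10) (Nat.div_lt_self (by omega) (by omega)) c h1
      · simp at h1; subst h1; exact pvDigitChar_isDigit (m % 10) (by omega)

-- replace: removing "$" from '$' :: D when D has no '$'
theorem pvGo_nodollar : ∀ (fuel : Nat) (l acc : List Char), (∀ c ∈ l, c ≠ '$') →
    PySem.Chars.replace.go ['$'] [] fuel l acc = acc.reverse ++ l := by
  intro fuel
  induction fuel with
  | zero => intro l acc h; rw [PySem.Chars.replace.go]
  | succ f ih =>
    intro l acc h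
    cases l with
    | nil => rw [PySem.Chars.replace.go] <;> simp
    | cons c t =>
      rw [PySem.Chars.replace.go]
      have hpre : ['$'].isPrefixOf (c :: t) = false := by
        simp [List.isPrefixOf]
        exact fun hc => (h c (by simp) hc.symm).elim
      rw [hpre]
      simp only [Bool.false_eq_true, if_false]
      rw [ih t (c :: acc) (fun x hx => h x (by simp [hx]))]
      simp

theorem pvReplace_dollar (D : List Char) (h : ∀ c ∈ D, c ≠ '$') :
    PySem.Chars.replace ('$' :: D) ['$'] [] = D := by
  rw [PySem.Chars.replace]
  simp only [List.isEmpty_cons, Bool.false_eq_true, if_false, List.length_cons]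
  rw [PySem.Chars.replace.go]
  have hpre : (['$'] : List Char).isPrefixOf ('$' :: D) = true := by simp [List.isPrefixOf]
  rw [hpre]
  simp only [if_true]
  rw [pvGo_nodollar _ _ _ (by simpa using h)]
  simp

theorem pvKeyVal (i : Int) (hi : 1 ≤ i) :
    pvDigitsVal (PySem.Str.replace ("$" ++ PySem.Int.toStr i) "$" "").toList = i := by
  rw [PySem.Str.toList_replace]
  have h1 : ("$" ++ PySem.Int.toStr i).toList = '$' :: Nat.toDigits 10 i.toNat := by
    rw [String.toList_append, PySem.Int.toList_toStr, PySem.Int.toChars, if_neg (by omega)]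
    rfl
  have h2 : ("$" : String).toList = ['$'] := rfl
  have h3 : ("" : String).toList = [] := rfl
  rw [h1, h2, h3]
  rw [pvReplace_dollar _ (fun c hc => by
    intro hd
    have := pvDigits_isDigit i.toNat c hc
    rw [hd] at this
    exact absurd this (by decide))]
  rw [pvDigitsVal_toDigits]
  omega

theorem pyformat2psql_sorted_id (O : List String) :
    PySem.List.sorted (pvMapFrom 1 O)
      (fun it => pvDigitsVal (PySem.Str.replace it.2 "$" "").toList) false = pvMapFrom 1 O := by
  apply PySem.List.sorted_eq_of_perm_of_pairwise_lt
  · exact List.Perm.refl _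
  · unfold pvMapFrom
    rw [List.pairwise_map]
    have hp := PySem.List.pairwise_lt_enumerate (xs := O) (s := 1)
    refine List.Pairwise.imp_of_mem ?_ hp
    intro p q hpm hqm hlt
    have h1p : 1 ≤ p.1 := by
      rcases (PySem.List.mem_enumerate_iff O 1 p).mp hpm with ⟨k, hk, rfl⟩
      simp
    have h1q : 1 ≤ q.1 := by
      rcases (PySem.List.mem_enumerate_iff O 1 q).mp hqm with ⟨k, hk, rfl⟩
      simp
    dsimp only
    rw [pvKeyVal p.1 h1p, pvKeyVal q.1 h1q]
    exact hlt

theorem pvMapFrom_map_fst (s : Int) (l : List String) (f : String → String) :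
    (pvMapFrom s l).map (fun it => f it.1) = l.map f := by
  rw [pvMapFrom, List.map_map]
  have hcomp : ((fun it : String × String => f it.1) ∘ fun p : Int × String => (p.2, "$" ++ PySem.Int.toStr p.1))
      = (f ∘ fun p : Int × String => p.2) := rfl
  rw [hcomp, ← List.map_map, PySem.List.map_snd_enumerate]

-- ===== VERDICT (by name: the statement is the Claim_ definition above) =====
theorem pyformat2psql_spec : Claim_equal_pyformat2psql := by
  unfold Claim_equal_pyformat2psql
  intro query na _hdom hpre
  unfold Spec_pyformat2psql
  unfold Pre_pyformat2psql at hpre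
  replace hpre := pvScan_imp_pvPreChk query.toList.length na query.toList (le_refl _) hpre
  show pyformat2psql query na = pyformat2psql_alt query na
  unfold pyformat2psql pyformat2psql_alt
  have hmain := pvMain query.toList.length query.toList na [] (le_refl _) hpre
  norm_num at hmain
  have h0 : (PySem.Dict.empty : PySem.Dict String String) = pvDict [] := rfl
  rw [h0, hmain]
  dsimp only
  have hitems : (pvDict (pvOrd [] (tokenizeB query.toList))).items
      = pvMapFrom 1 (pvOrd [] (tokenizeB query.toList)) := rfl
  rw [hitems, pyformat2psql_sorted_id]
  refine Prod.ext rfl ?_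
  exact pvMapFrom_map_fst 1 _ (fun k => (List.lookup k na).getD "")
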